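-- pv_equiv track=rewrite | github.com/The-OS-Team/CPU-scheduling-simulator | src/utils/gantt.py | compress_timeline
-- ===== SOURCE A (Python) =====
-- def compress_timeline(timeline):
--     if not timeline:
--         return []
--
--     compressed = [timeline[0]]
--
--     for pid, start, end in timeline[1:]:
--         last_pid, last_start, last_end = compressed[-1]
--
--         if pid == last_pid:
--             compressed[-1] = (last_pid, last_start, end)
--         else:
--             compressed.append((pid, start, end))
--
--     return compressed
-- ===== SOURCE B (Python) =====
-- def compress_timeline(timeline):
--     result = []
--     i = 0
--     n = len(timeline)
--     while i < n:
--         pid, start, end = timeline[i]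
--         j = i + 1
--         while j < n and timeline[j][0] == pid:
--             j += 1
--         result.append((pid, start, timeline[j - 1][2]))
--         i = j
--     return result
-- ===== Notes on version B (the rewrite author's own statement) =====
-- stated objective: alternative
-- what changed: B scans each run of equal PIDs with an index and emits one tuple per run, instead of A's building a list and repeatedly rewriting its last element.
import Mathlib
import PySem

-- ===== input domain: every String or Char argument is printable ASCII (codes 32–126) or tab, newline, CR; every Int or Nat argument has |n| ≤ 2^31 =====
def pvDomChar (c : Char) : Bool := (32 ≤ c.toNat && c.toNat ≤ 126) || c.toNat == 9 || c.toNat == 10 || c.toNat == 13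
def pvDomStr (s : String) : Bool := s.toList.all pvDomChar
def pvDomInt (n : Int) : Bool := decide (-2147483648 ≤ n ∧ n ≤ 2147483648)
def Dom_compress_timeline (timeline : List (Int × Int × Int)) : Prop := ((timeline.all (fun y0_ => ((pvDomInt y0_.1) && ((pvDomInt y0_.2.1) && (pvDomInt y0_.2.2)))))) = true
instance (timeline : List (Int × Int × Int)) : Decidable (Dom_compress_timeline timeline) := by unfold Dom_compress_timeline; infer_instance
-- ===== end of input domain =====

-- B merges runs of equal PIDs by scanning each run forward, instead of A's patching of the last appended tuple.

-- ===== PORT A =====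
-- loop body of A: look at compressed[-1], either rewrite it or append the new segment
def pvStepA (compressed : List (Int × Int × Int)) (seg : Int × Int × Int) : List (Int × Int × Int) :=
  match compressed.getLast? with
  | some (lp, ls, _le) =>
      if seg.1 == lp then compressed.dropLast ++ [(lp, ls, seg.2.2)]
      else compressed ++ [seg]
  | none => compressed   -- unreachable: compressed starts nonempty and stays nonempty

def compress_timeline (timeline : List (Int × Int × Int)) : List (Int × Int × Int) :=
  match timeline with
  | [] => []
  | h :: t => t.foldl pvStepA [h]

-- ===== PORT B =====
-- B's inner index scan `while j < n and timeline[j][0] == pid` is ported as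
-- takeWhile/dropWhile on the remaining list (exact: same run boundary), and
-- `timeline[j-1][2]` is the end of the last run element, or `end` if the run is just the head.
def compress_timeline_alt (timeline : List (Int × Int × Int)) : List (Int × Int × Int) :=
  match timeline with
  | [] => []
  | (p, s, e) :: rest =>
      let run := rest.takeWhile (fun x => x.1 == p)
      (p, s, (run.getLastD (p, s, e)).2.2) ::
        compress_timeline_alt (rest.dropWhile (fun x => x.1 == p))
termination_by timeline.length
decreasing_by
  simp only [List.length_cons]
  exact Nat.lt_succ_of_le (List.length_dropWhile_le _ _)

-- ===== PRECONDITION & SPEC =====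
def Spec_compress_timeline (timeline : List (Int × Int × Int)) (out : List (Int × Int × Int)) : Prop := out = compress_timeline_alt timeline
instance (timeline : List (Int × Int × Int)) (out : List (Int × Int × Int)) : Decidable (Spec_compress_timeline timeline out) := by unfold Spec_compress_timeline; infer_instance

-- ===== CLAIM (what is proved, stated in full; the proofs are below) =====
def Claim_equal_compress_timeline : Prop := ∀ (timeline : List (Int × Int × Int)), Dom_compress_timeline timeline → Spec_compress_timeline timeline (compress_timeline timeline)

-- ===== LEMMAS AND PROOFS =====

theorem pv_step_singleton (l x : Int × Int × Int) :
    pvStepA [l] x =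
      (if x.1 == l.1 then [(l.1, l.2.1, x.2.2)] else [l] ++ [x]) := by
  obtain ⟨lp, ls, le⟩ := l
  simp [pvStepA, List.getLast?_singleton]

theorem pv_step_concat (pre : List (Int × Int × Int)) (l x : Int × Int × Int) :
    pvStepA (pre ++ [l]) x = pre ++ pvStepA [l] x := by
  obtain ⟨lp, ls, le⟩ := l
  rw [pv_step_singleton]
  simp only [pvStepA, List.getLast?_concat, List.dropLast_concat]
  by_cases h : x.1 == (lp, ls, le).1 <;> simp [h]

-- A's fold only ever touches the last element of the accumulator
theorem pv_foldl_step_append (t : List (Int × Int × Int)) :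
    ∀ (pre : List (Int × Int × Int)) (l : Int × Int × Int),
      t.foldl pvStepA (pre ++ [l]) = pre ++ t.foldl pvStepA [l] := by
  induction t with
  | nil => intro pre l; simp [List.foldl]
  | cons x t ih =>
    intro pre l
    simp only [List.foldl]
    rw [pv_step_concat, pv_step_singleton]
    by_cases h : x.1 == l.1
    · rw [if_pos h]
      exact ih pre _
    · rw [if_neg h, ← List.append_assoc]
      rw [ih (pre ++ [l]) x, ih [l] x]
      simp

-- collapsing two adjacent same-PID segments at the front does not change B's result
theorem pv_alt_collapse (p s e s2 e2 : Int) (t : List (Int × Int × Int)) :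
    compress_timeline_alt ((p, s, e) :: (p, s2, e2) :: t) =
    compress_timeline_alt ((p, s, e2) :: t) := by
  rw [compress_timeline_alt.eq_def]
  conv_rhs => rw [compress_timeline_alt.eq_def]
  simp only [List.takeWhile, List.dropWhile, beq_self_eq_true]
  cases htw : t.takeWhile (fun x => x.1 == p) with
  | nil => simp [List.getLastD]
  | cons y ys => simp [List.getLastD]

theorem pv_main (t : List (Int × Int × Int)) :
    ∀ (p s e : Int),
      t.foldl pvStepA [(p, s, e)] = compress_timeline_alt ((p, s, e) :: t) := by
  induction t with
  | nil =>
    intro p s e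
    rw [compress_timeline_alt.eq_def]
    simp only [List.foldl, List.takeWhile, List.dropWhile, List.getLastD]
    rw [compress_timeline_alt.eq_def]
  | cons x t ih =>
    intro p s e
    obtain ⟨q, s2, e2⟩ := x
    simp only [List.foldl]
    by_cases h : q = p
    · subst h
      rw [pv_step_singleton, if_pos (by simp)]
      rw [ih, pv_alt_collapse]
    · have hb : (((q, s2, e2) : Int × Int × Int).1 == p) = false :=
        beq_eq_false_iff_ne.mpr h
      rw [pv_step_singleton, if_neg (by simp [h])]
      rw [pv_foldl_step_append t [(p, s, e)] (q, s2, e2), ih]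
      simp only [List.singleton_append]
      conv_rhs => rw [compress_timeline_alt.eq_def]
      simp [List.takeWhile, List.dropWhile, hb, List.getLastD]

-- ===== VERDICT (by name: the statement is the Claim_ definition above) =====
theorem compress_timeline_spec : Claim_equal_compress_timeline := by
  intro timeline _
  unfold Spec_compress_timeline
  match timeline with
  | [] => rw [compress_timeline_alt.eq_def]; rfl
  | (p, s, e) :: t =>
    exact pv_main t p s e
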